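-- pv_equiv track=rewrite | github.com/GenoRobotics-EPFL/Vladimir-project | src/qualityConsensus.py | lengthConsensusAboveMedian
-- ===== SOURCE A (Python) =====
-- def lengthConsensusAboveMedian(coverages, medianCoverage):
--
--     # find first base with coverage above median
--     start = 0
--     for i, cov in enumerate(coverages):
--         if cov >= medianCoverage:
--             start = i
--             break
--
--     # find last base with coverage above median
--     end = 0
--     for i, cov in reversed(list(enumerate(coverages))):
--         if cov >= medianCoverage:
--             end = i
--             break
--
--     return end - start
-- ===== SOURCE B (Python) =====
-- def lengthConsensusAboveMedian(coverages, medianCoverage):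
--     # single forward pass: record the first and the last index with coverage >= median
--     start = None
--     end = 0
--     for i, cov in enumerate(coverages):
--         if cov >= medianCoverage:
--             if start is None:
--                 start = i
--             end = i
--     return end - (0 if start is None else start)
-- ===== Notes on version B (the rewrite author's own statement) =====
-- stated objective: simpler
-- what changed: Replaced A's two directed scans (forward for the first index, over a reversed materialised enumerate for the last) by one forward pass that tracks both the first and the last qualifying index.
import Mathlib
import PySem

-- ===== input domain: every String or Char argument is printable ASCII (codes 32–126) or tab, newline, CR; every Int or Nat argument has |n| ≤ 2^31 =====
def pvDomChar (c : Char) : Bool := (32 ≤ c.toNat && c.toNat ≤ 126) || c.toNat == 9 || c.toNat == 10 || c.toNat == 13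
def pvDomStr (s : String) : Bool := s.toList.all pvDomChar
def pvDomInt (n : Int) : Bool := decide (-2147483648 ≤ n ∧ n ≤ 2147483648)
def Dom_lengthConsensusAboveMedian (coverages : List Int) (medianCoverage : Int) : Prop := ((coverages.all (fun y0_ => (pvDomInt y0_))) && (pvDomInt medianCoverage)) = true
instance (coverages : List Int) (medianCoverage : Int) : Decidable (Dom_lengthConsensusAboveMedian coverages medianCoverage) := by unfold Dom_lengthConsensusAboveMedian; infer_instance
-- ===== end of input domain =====

-- B replaces A's two directed scans (forward for 'start', over reversed(list(enumerate(...))) for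
-- 'end') by one forward pass maintaining both boundary indices; objective: simpler.

-- ===== PORT A =====
-- A's first for-loop with break: scan the (index, value) pairs, return the index of the first
-- match, default 0 (the initial value of start/end when the loop never breaks).
def pvFindFirstA (m : Int) : List (Int × Int) → Int
  | [] => 0
  | (i, cov) :: rest => if cov ≥ m then i else pvFindFirstA m rest

def lengthConsensusAboveMedian (coverages : List Int) (medianCoverage : Int) : Int :=
  let start := pvFindFirstA medianCoverage (PySem.List.enumerate coverages)
  let «end» := pvFindFirstA medianCoverage (PySem.List.enumerate coverages).reverse
  «end» - start

-- ===== PORT B =====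
-- B's single loop: state (start : Option Int, end : Int); start set once, end on every match.
def pvLoopB (m : Int) : List (Int × Int) → Option Int → Int → Option Int × Int
  | [], s, e => (s, e)
  | (i, cov) :: rest, s, e =>
      if cov ≥ m then pvLoopB m rest (if s.isNone then some i else s) i
      else pvLoopB m rest s e

def lengthConsensusAboveMedian_alt (coverages : List Int) (medianCoverage : Int) : Int :=
  let (s, e) := pvLoopB medianCoverage (PySem.List.enumerate coverages) none 0
  e - (match s with | none => 0 | some x => x)

-- ===== PRECONDITION & SPEC =====
def Spec_lengthConsensusAboveMedian (coverages : List Int) (medianCoverage : Int) (out : Int) : Prop := out = lengthConsensusAboveMedian_alt coverages medianCoverage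
instance (coverages : List Int) (medianCoverage : Int) (out : Int) : Decidable (Spec_lengthConsensusAboveMedian coverages medianCoverage out) := by unfold Spec_lengthConsensusAboveMedian; infer_instance

-- ===== CLAIM (what is proved, stated in full; the proofs are below) =====
def Claim_equal_lengthConsensusAboveMedian : Prop := ∀ (coverages : List Int) (medianCoverage : Int), Dom_lengthConsensusAboveMedian coverages medianCoverage → Spec_lengthConsensusAboveMedian coverages medianCoverage (lengthConsensusAboveMedian coverages medianCoverage)

-- ===== LEMMAS AND PROOFS =====

-- first match of l as an Option
def pvFind? (m : Int) : List (Int × Int) → Option Int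
  | [] => none
  | (i, cov) :: rest => if cov ≥ m then some i else pvFind? m rest

-- find-with-default, used to describe B's `end` accumulator
def pvFindD (m : Int) (d : Int) : List (Int × Int) → Int
  | [] => d
  | (i, cov) :: rest => if cov ≥ m then i else pvFindD m d rest

theorem pvFindD_append (m d : Int) (a b : List (Int × Int)) :
    pvFindD m d (a ++ b) = pvFindD m (pvFindD m d b) a := by
  induction a with
  | nil => rfl
  | cons p rest ih =>
      obtain ⟨i, cov⟩ := p
      simp only [pvFindD, List.cons_append]
      split <;> simp [ih]

theorem pvFindD_eq_find? (m : Int) (l : List (Int × Int)) :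
    pvFindD m 0 l = (pvFind? m l).getD 0 := by
  induction l with
  | nil => rfl
  | cons p rest ih =>
      obtain ⟨i, cov⟩ := p
      simp only [pvFindD, pvFind?]
      split <;> simp [ih]

theorem pvLoopB_fst (m : Int) (l : List (Int × Int)) (s : Option Int) (e : Int) :
    (pvLoopB m l s e).1 = s.orElse (fun _ => pvFind? m l) := by
  induction l generalizing s e with
  | nil => cases s <;> rfl
  | cons p rest ih =>
      obtain ⟨i, cov⟩ := p
      simp only [pvLoopB, pvFind?]
      split
      · rw [ih]; cases s <;> rfl
      · exact ih s e

theorem pvLoopB_snd (m : Int) (l : List (Int × Int)) (s : Option Int) (e : Int) :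
    (pvLoopB m l s e).2 = pvFindD m e l.reverse := by
  induction l generalizing s e with
  | nil => rfl
  | cons p rest ih =>
      obtain ⟨i, cov⟩ := p
      simp only [pvLoopB, List.reverse_cons, pvFindD_append]
      split <;> simp [ih, pvFindD, *]

theorem pvFindFirstA_eq_findD (m : Int) (l : List (Int × Int)) :
    pvFindFirstA m l = pvFindD m 0 l := by
  induction l with
  | nil => rfl
  | cons p rest ih =>
      obtain ⟨i, cov⟩ := p
      simp only [pvFindFirstA, pvFindD]
      split <;> simp [ih]

-- ===== VERDICT (by name: the statement is the Claim_ definition above) =====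
theorem lengthConsensusAboveMedian_spec : Claim_equal_lengthConsensusAboveMedian := by
  intro cov m _
  show lengthConsensusAboveMedian cov m = lengthConsensusAboveMedian_alt cov m
  unfold lengthConsensusAboveMedian lengthConsensusAboveMedian_alt
  rcases hp : pvLoopB m (PySem.List.enumerate cov) none 0 with ⟨s, e⟩
  have hs : s = pvFind? m (PySem.List.enumerate cov) := by
    have h := pvLoopB_fst m (PySem.List.enumerate cov) none 0
    rw [hp] at h; simpa using h
  have he : e = pvFindD m 0 (PySem.List.enumerate cov).reverse := by
    have h := pvLoopB_snd m (PySem.List.enumerate cov) none 0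
    rw [hp] at h; simpa using h
  simp only [hp, hs, he, pvFindFirstA_eq_findD, pvFindD_eq_find?]
  cases pvFind? m (PySem.List.enumerate cov) <;> simp
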